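-- pv_equiv track=rewrite | github.com/simurech/libre-bite | languages/update-translations.py | _encode_po_string
-- ===== SOURCE A (Python) =====
-- def _encode_po_string(value: str) -> str:
--     """Kodiert Python-String → PO-Format (mehrzeilig wenn nötig)."""
--     escaped = value.replace('\\', '\\\\').replace('"', '\\"').replace('\n', '\\n')
--     if '\\n' in escaped:
--         parts = escaped.split('\\n')
--         # Letzter Part ist leer wenn String mit \n endet → ignorieren
--         lines = []
--         for i, part in enumerate(parts):
--             if i < len(parts) - 1:
--                 lines.append('"' + part + '\\n"')
--             elif part:
--                 lines.append('"' + part + '"')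
--         return '""\n' + '\n'.join(lines)
--     return '"' + escaped + '"'
-- ===== SOURCE B (Python) =====
-- def _encode_po_string(value: str) -> str:
--     escaped = value.replace('\\', '\\\\').replace('"', '\\"').replace('\n', '\\n')
--     if '\\n' not in escaped:
--         return '"' + escaped + '"'
--     inner = escaped.replace('\\n', '\\n"\n"')
--     full = '""\n"' + inner + '"'
--     if escaped.endswith('\\n'):
--         full = full[:-3]
--     return full
-- ===== Notes on version B (the rewrite author's own statement) =====
-- stated objective: alternative
-- what changed: The multiline case no longer splits the escaped string into a list of parts and loops over it with enumerate and index comparisons; B rewrites each escaped-newline marker in place with a single replace call, wraps the result, and trims the trailing empty quoted line with one endswith check.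
import Mathlib
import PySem

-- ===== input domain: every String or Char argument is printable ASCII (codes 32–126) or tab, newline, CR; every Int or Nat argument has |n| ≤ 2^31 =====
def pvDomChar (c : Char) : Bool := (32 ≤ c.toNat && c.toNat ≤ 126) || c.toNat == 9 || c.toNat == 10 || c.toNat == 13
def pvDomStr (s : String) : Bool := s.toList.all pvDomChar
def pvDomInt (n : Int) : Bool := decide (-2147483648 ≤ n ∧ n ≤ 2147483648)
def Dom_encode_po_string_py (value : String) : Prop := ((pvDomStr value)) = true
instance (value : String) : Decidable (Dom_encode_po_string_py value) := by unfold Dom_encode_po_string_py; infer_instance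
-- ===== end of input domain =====

-- B replaces A's split-into-parts + enumerate/index loop by a single in-place rewrite
-- (replace '\n' -> '\n"\n"'), a wrap, and one endswith-driven trim of the trailing empty
-- quoted line; same escaping, same result (objective: alternative decomposition).

-- ===== PORT A =====
def encode_po_string_py (value : String) : String :=
  let escaped := PySem.Chars.replace (PySem.Chars.replace (PySem.Chars.replace
    value.toList ['\\'] ['\\','\\']) ['"'] ['\\','"']) ['\n'] ['\\','n']
  if PySem.Chars.isIn ['\\','n'] escaped then
    let parts := PySem.Chars.splitOn escaped ['\\','n']
    let lines := (PySem.List.enumerate parts 0).foldl (fun acc ip =>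
      if ip.1 < (parts.length : Int) - 1 then acc ++ [['"'] ++ ip.2 ++ ['\\','n','"']]
      else if ip.2 ≠ [] then acc ++ [['"'] ++ ip.2 ++ ['"']] else acc) []
    String.mk (['"','"','\n'] ++ PySem.Chars.join ['\n'] lines)
  else
    String.mk (['"'] ++ escaped ++ ['"'])

-- ===== PORT B =====
def encode_po_string_py_alt (value : String) : String :=
  let escaped := PySem.Chars.replace (PySem.Chars.replace (PySem.Chars.replace
    value.toList ['\\'] ['\\','\\']) ['"'] ['\\','"']) ['\n'] ['\\','n']
  if !(PySem.Chars.isIn ['\\','n'] escaped) then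
    String.mk (['"'] ++ escaped ++ ['"'])
  else
    let inner := PySem.Chars.replace escaped ['\\','n'] ['\\','n','"','\n','"']
    let full := ['"','"','\n','"'] ++ inner ++ ['"']
    let full := if PySem.Chars.endswith escaped ['\\','n']
      then PySem.Chars.slice full none (some (-3)) else full
    String.mk full

-- ===== PRECONDITION & SPEC =====
def Spec_encode_po_string_py (value : String) (out : String) : Prop := out = encode_po_string_py_alt value
instance (value : String) (out : String) : Decidable (Spec_encode_po_string_py value out) := by unfold Spec_encode_po_string_py; infer_instance

-- ===== CLAIM (what is proved, stated in full; the proofs are below) =====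
def Claim_equal_encode_po_string_py : Prop := ∀ (value : String), Dom_encode_po_string_py value → Spec_encode_po_string_py value (encode_po_string_py value)

-- ===== LEMMAS AND PROOFS =====

theorem repGo_acc (old new : List Char) : ∀ (fuel : Nat) (l acc : List Char),
    PySem.Chars.replace.go old new fuel l acc = acc.reverse ++ PySem.Chars.replace.go old new fuel l [] := by
  intro fuel
  induction fuel with
  | zero => intro l acc; rw [PySem.Chars.replace.go, PySem.Chars.replace.go] <;> simp
  | succ f ih =>
    intro l acc
    cases l with
    | nil => rw [PySem.Chars.replace.go, PySem.Chars.replace.go] <;> simp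
    | cons c t =>
      rw [PySem.Chars.replace.go, PySem.Chars.replace.go]
      split
      · rw [ih _ (new.reverse ++ acc), ih _ (new.reverse ++ [])]; simp
      · rw [ih _ (c :: acc), ih _ (c :: [])]; simp

theorem splitGo_acc (sep : List Char) : ∀ (fuel : Nat) (l cur : List Char) (acc : List (List Char)),
    PySem.Chars.splitOn.go sep fuel l cur acc = acc.reverse ++ PySem.Chars.splitOn.go sep fuel l cur [] := by
  intro fuel
  induction fuel with
  | zero => intro l cur acc; rw [PySem.Chars.splitOn.go, PySem.Chars.splitOn.go] <;> simp
  | succ f ih =>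
    intro l cur acc
    cases l with
    | nil => rw [PySem.Chars.splitOn.go, PySem.Chars.splitOn.go] <;> simp
    | cons c t =>
      rw [PySem.Chars.splitOn.go, PySem.Chars.splitOn.go]
      split
      · rw [ih _ _ (cur.reverse :: acc), ih _ _ (cur.reverse :: [])]; simp
      · exact ih t (c::cur) acc

theorem splitGo_ne_nil (sep : List Char) : ∀ (fuel : Nat) (l cur : List Char) (acc : List (List Char)),
    PySem.Chars.splitOn.go sep fuel l cur acc ≠ [] := by
  intro fuel
  induction fuel with
  | zero => intro l cur acc; rw [PySem.Chars.splitOn.go] <;> simp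
  | succ f ih =>
    intro l cur acc
    cases l with
    | nil => rw [PySem.Chars.splitOn.go] <;> simp
    | cons c t =>
      rw [PySem.Chars.splitOn.go]
      split
      · exact ih _ _ _
      · exact ih _ _ _

theorem splitGo_cur (sep : List Char) : ∀ (fuel : Nat) (l cur : List Char),
    PySem.Chars.splitOn.go sep fuel l cur [] =
      (PySem.Chars.splitOn.go sep fuel l [] []).modifyHead (cur.reverse ++ ·) := by
  intro fuel
  induction fuel with
  | zero => intro l cur; rw [PySem.Chars.splitOn.go, PySem.Chars.splitOn.go] <;> simp
  | succ f ih =>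
    intro l cur
    cases l with
    | nil => rw [PySem.Chars.splitOn.go, PySem.Chars.splitOn.go] <;> simp
    | cons c t =>
      rw [PySem.Chars.splitOn.go, PySem.Chars.splitOn.go]
      split
      · rw [splitGo_acc sep f _ _ (cur.reverse :: []), splitGo_acc sep f _ _ ([].reverse :: [])]
        cases h : PySem.Chars.splitOn.go sep f (List.drop sep.length (c :: t)) [] [] with
        | nil => exact absurd h (splitGo_ne_nil sep f _ _ _)
        | cons a b => simp
      · rw [ih t (c :: cur), ih t (c :: [])]
        rw [List.modifyHead_modifyHead]
        congr 1
        funext x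
        simp

theorem two_le_splitGo_length (sep : List Char) (hsep : sep ≠ []) :
    ∀ (fuel : Nat) (l cur : List Char) (acc : List (List Char)), l.length < fuel → sep <:+: l →
    2 + acc.length ≤ (PySem.Chars.splitOn.go sep fuel l cur acc).length := by
  intro fuel
  induction fuel with
  | zero => intro l cur acc h; omega
  | succ f ih =>
    intro l cur acc hlen hinf
    cases l with
    | nil => exact absurd (List.eq_nil_of_infix_nil hinf) hsep
    | cons c t =>
      rw [PySem.Chars.splitOn.go]
      split
      · rename_i hpre
        rw [splitGo_acc sep f _ _ (cur.reverse :: acc)]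
        have := splitGo_ne_nil sep f (List.drop sep.length (c :: t)) [] []
        have hl : 1 ≤ (PySem.Chars.splitOn.go sep f (List.drop sep.length (c :: t)) [] []).length := by
          cases h : PySem.Chars.splitOn.go sep f (List.drop sep.length (c :: t)) [] [] with
          | nil => exact absurd h this
          | cons a b => simp
        simp only [List.length_append, List.length_reverse, List.length_cons]
        omega
      · rename_i hpre
        have ht : sep <:+: t := by
          rcases (List.infix_cons_iff).1 hinf with h | h
          · exact absurd ((List.isPrefixOf_iff_prefix).2 h) (by simpa using hpre)
          · exact h
        exact ih t (c :: cur) acc (by simpa using Nat.lt_of_succ_lt_succ hlen) ht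

theorem intercalate_cons_append (sep a b : List Char) (rest : List (List Char)) :
    List.intercalate sep ((a ++ b) :: rest) = a ++ List.intercalate sep (b :: rest) := by
  cases rest <;> simp [List.intercalate]

theorem repGo_eq_intercalate (old new : List Char) (hold : old ≠ []) :
    ∀ (f1 : Nat) (f2 : Nat) (l : List Char), l.length ≤ f1 → l.length ≤ f2 →
    PySem.Chars.replace.go old new f1 l [] =
      List.intercalate new (PySem.Chars.splitOn.go old f2 l [] []) := by
  intro f1
  induction f1 with
  | zero =>
    intro f2 l h1 h2
    have hl : l = [] := by cases l <;> simp_all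
    subst hl
    cases f2 with
    | zero => rw [PySem.Chars.replace.go, PySem.Chars.splitOn.go] <;> simp [List.intercalate]
    | succ g => rw [PySem.Chars.replace.go, PySem.Chars.splitOn.go] <;> simp [List.intercalate]
  | succ f ih =>
    intro f2 l h1 h2
    cases l with
    | nil =>
      cases f2 with
      | zero => rw [PySem.Chars.replace.go, PySem.Chars.splitOn.go] <;> simp [List.intercalate]
      | succ g => rw [PySem.Chars.replace.go, PySem.Chars.splitOn.go] <;> simp [List.intercalate]
    | cons c t =>
      cases f2 with
      | zero => simp at h2
      | succ g =>
        rw [PySem.Chars.replace.go, PySem.Chars.splitOn.go]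
        split
        · rename_i hpre
          have hdrop : (List.drop old.length (c :: t)).length ≤ f ∧ (List.drop old.length (c :: t)).length ≤ g := by
            have : 1 ≤ old.length := by cases old <;> simp_all
            simp only [List.length_drop, List.length_cons] at *
            omega
          rw [repGo_acc old new f _ (new.reverse ++ []), splitGo_acc old g _ _ ([].reverse :: [])]
          rw [ih g _ hdrop.1 hdrop.2]
          cases h : PySem.Chars.splitOn.go old g (List.drop old.length (c :: t)) [] [] with
          | nil => exact absurd h (splitGo_ne_nil old g _ _ _)
          | cons a b => simp [List.intercalate]
        · rename_i hpre
          have ht : t.length ≤ f ∧ t.length ≤ g := by simp at h1 h2; omega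
          rw [repGo_acc old new f t (c :: []), splitGo_cur old g t (c :: [])]
          rw [ih g t ht.1 ht.2]
          cases h : PySem.Chars.splitOn.go old g t [] [] with
          | nil => exact absurd h (splitGo_ne_nil old g _ _ _)
          | cons a b =>
            simpa using (intercalate_cons_append new [c] a b).symm

theorem sl1 (c : Char) (t : List Char) (h : ¬ ['\\','n'] <+: (c :: t)) :
    (['\\','n'] <:+ (c :: t)) ↔ ['\\','n'] <:+ t := by
  constructor
  · rintro ⟨u, hu⟩
    cases u with
    | nil =>
      exfalso
      apply h
      have he : c :: t = ['\\','n'] := by simpa using hu.symm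
      rw [he]
    | cons d u' =>
      refine ⟨u', ?_⟩
      simpa using congrArg (List.drop 1) hu
  · intro hs
    exact hs.trans (List.suffix_cons c t)

theorem sl2 (r : List Char) :
    (['\\','n'] <:+ (['\\','n'] ++ r)) ↔ (['\\','n'] <:+ r ∨ r = []) := by
  constructor
  · rintro ⟨u, hu⟩
    have hlen : u.length = r.length := by
      have := congrArg List.length hu
      simp at this; omega
    match r, u, hlen with
    | [], [], _ => exact Or.inr rfl
    | [x], [y], _ =>
      exfalso
      simp at hu
    | x :: y :: r', u, hlen =>
      left
      have h2 : (2 : Nat) ≤ u.length := by simp at hlen; omega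
      have hd := congrArg (List.drop 2) hu
      rw [List.drop_append_of_le_length h2] at hd
      simp at hd
      exact ⟨u.drop 2, by simpa using hd⟩
  · rintro (hs | rfl)
    · exact hs.trans (List.suffix_append _ _)
    · simp

theorem split_last : ∀ (fuel : Nat) (l cur : List Char) (acc : List (List Char)), l.length < fuel →
    ((PySem.Chars.splitOn.go ['\\','n'] fuel l cur acc).getLastD [] = [] ↔
      (['\\','n'] <:+ l ∨ (l = [] ∧ cur = []))) := by
  intro fuel
  induction fuel with
  | zero => intro l cur acc h; omega
  | succ f ih =>
    intro l cur acc hlen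
    cases l with
    | nil =>
      have hgo : PySem.Chars.splitOn.go ['\\','n'] (f+1) [] cur acc = (cur.reverse :: acc).reverse := by
        rw [PySem.Chars.splitOn.go] <;> simp
      rw [hgo]
      constructor
      · intro h
        right
        refine ⟨rfl, ?_⟩
        simp at h
        simpa using h
      · rintro (h | ⟨-, rfl⟩)
        · exact absurd h (by simp)
        · simp
    | cons c t =>
      rw [PySem.Chars.splitOn.go]
      split
      · rename_i hpre
        have hp : ['\\','n'] <+: (c :: t) := (List.isPrefixOf_iff_prefix).1 hpre
        obtain ⟨w, hw⟩ := hp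
        have hdw : List.drop (['\\','n'] : List Char).length (c :: t) = w := by
          rw [← hw]; simp
        rw [hdw]
        have hlw : w.length < f := by
          have h2 := congrArg List.length hw
          simp only [List.length_append, List.length_cons] at h2 hlen
          omega
        rw [ih w [] (cur.reverse :: acc) hlw]
        rw [← hw, sl2]
        constructor
        · rintro (h | ⟨rfl, -⟩)
          · exact Or.inl (Or.inl h)
          · exact Or.inl (Or.inr rfl)
        · rintro ((h | h) | ⟨h, -⟩)
          · exact Or.inl h
          · exact Or.inr ⟨h, rfl⟩
          · simp at h
      · rename_i hpre
        rw [ih t (c :: cur) acc (by simp at hlen ⊢; omega)]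
        have hs := sl1 c t (fun hp => hpre (by simpa using (List.isPrefixOf_iff_prefix).2 hp))
        constructor
        · rintro (h | ⟨rfl, h⟩)
          · exact Or.inl (hs.2 h)
          · simp at h
        · rintro (h | ⟨h, -⟩)
          · exact Or.inl (hs.1 h)
          · simp at h

theorem intercalate_cc (sep a b : List Char) (rest : List (List Char)) :
    List.intercalate sep (a :: b :: rest) = a ++ sep ++ List.intercalate sep (b :: rest) := by
  simp [List.intercalate, List.intersperse]

theorem intercalate_cc' (sep a : List Char) (L : List (List Char)) (h : L ≠ []) :
    List.intercalate sep (a :: L) = a ++ sep ++ List.intercalate sep L := by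
  cases L with
  | nil => simp at h
  | cons b rest => exact intercalate_cc sep a b rest

theorem intercalate_concat (xs : List (List Char)) (y : List Char) (h : xs ≠ []) :
    List.intercalate ['\n'] (xs ++ [y]) = List.intercalate ['\n'] xs ++ ['\n'] ++ y := by
  induction xs with
  | nil => simp at h
  | cons a rest ih =>
    cases rest with
    | nil => simp [List.intercalate, List.intersperse]
    | cons b rest' =>
      have hih := ih (by simp)
      simp only [List.cons_append]
      rw [intercalate_cc' _ a _ (by simp), intercalate_cc' _ a _ (by simp)]
      simp only [List.cons_append] at hih
      rw [hih]
      simp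

theorem quote_bridge : ∀ (ps : List (List Char)), ps ≠ [] →
    ['"'] ++ List.intercalate ['\\','n','"','\n','"'] ps ++ ['"'] =
      List.intercalate ['\n'] (ps.dropLast.map (fun p => ['"'] ++ p ++ ['\\','n','"']) ++
        [['"'] ++ ps.getLastD [] ++ ['"']]) := by
  intro ps
  induction ps with
  | nil => intro h; simp at h
  | cons p rest ih =>
    intro _
    cases rest with
    | nil => simp [List.intercalate, List.intersperse]
    | cons b rest' =>
      have hih := ih (by simp)
      have hdl : (p :: b :: rest').dropLast = p :: (b :: rest').dropLast := by simp
      have hgl : (p :: b :: rest').getLastD [] = (b :: rest').getLastD [] := by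
        simp [List.getLastD]
      rw [hdl, hgl, List.map_cons]
      have key : List.intercalate ['\n']
          (((['"'] ++ p ++ ['\\','n','"']) ::
            List.map (fun p => ['"'] ++ p ++ ['\\','n','"']) (b :: rest').dropLast) ++
              [['"'] ++ (b :: rest').getLastD [] ++ ['"']]) =
          (['"'] ++ p ++ ['\\','n','"']) ++ ['\n'] ++ List.intercalate ['\n']
            (List.map (fun p => ['"'] ++ p ++ ['\\','n','"']) (b :: rest').dropLast ++
              [['"'] ++ (b :: rest').getLastD [] ++ ['"']]) :=
        intercalate_cc' ['\n'] (['"'] ++ p ++ ['\\','n','"'])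
          (List.map (fun p => ['"'] ++ p ++ ['\\','n','"']) (b :: rest').dropLast ++
            [['"'] ++ (b :: rest').getLastD [] ++ ['"']]) (by simp)
      rw [key]
      rw [intercalate_cc' ['\\','n','"','\n','"'] p (b :: rest') (by simp)]
      rw [← hih]
      simp

theorem fold_lines (ps : List (List Char)) (qs : List (List Char)) (a : List Char)
    (hps : ps = qs ++ [a]) :
    (PySem.List.enumerate ps 0).foldl (fun acc ip =>
        if ip.1 < (ps.length : Int) - 1 then acc ++ [['"'] ++ ip.2 ++ ['\\','n','"']]
        else if ip.2 ≠ [] then acc ++ [['"'] ++ ip.2 ++ ['"']] else acc) [] =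
      qs.map (fun p => ['"'] ++ p ++ ['\\','n','"']) ++
        (if a = [] then [] else [['"'] ++ a ++ ['"']]) := by
  subst hps
  rw [PySem.List.enumerate_append, List.foldl_append]
  rw [PySem.List.foldl_congr_mem (PySem.List.enumerate qs 0) _
        (fun acc ip => acc ++ [['"'] ++ ip.2 ++ ['\\','n','"']]) []
        (by
          intro acc x hx
          rw [PySem.List.mem_enumerate_iff] at hx
          obtain ⟨k, hk, rfl⟩ := hx
          have : ((0 : Int) + k) < ((qs ++ [a]).length : Int) - 1 := by
            simp only [List.length_append, List.length_cons, List.length_nil]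
            push_cast
            omega
          rw [if_pos this])]
  have hsing := PySem.List.foldl_append_singleton_eq_map
      (fun (ip : Int × List Char) => ['"'] ++ ip.2 ++ ['\\','n','"'])
      (PySem.List.enumerate qs 0) []
  rw [hsing]
  rw [PySem.List.enumerate_cons, PySem.List.enumerate_nil]
  simp only [List.foldl_cons, List.foldl_nil]
  have hcond : ¬ ((0 : Int) + qs.length < ((qs ++ [a]).length : Int) - 1) := by
    simp only [List.length_append, List.length_cons, List.length_nil]
    push_cast
    omega
  rw [if_neg hcond]
  have hmap : List.map (fun ip => ['"'] ++ ip.2 ++ ['\\','n','"']) (PySem.List.enumerate qs 0) =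
      List.map (fun p => ['"'] ++ p ++ ['\\','n','"']) qs := by
    conv_rhs => rw [← PySem.List.map_snd_enumerate qs 0]
    rw [List.map_map]
    rfl
  rw [hmap]
  by_cases ha : a = []
  · subst ha; simp
  · simp [ha]

theorem slice_neg3 (xs : List Char) (a b c : Char) :
    PySem.List.slice (xs ++ [a, b, c]) none (some (-3)) = xs := by
  simp [PySem.List.slice]

theorem core_eq (e : List Char) :
    (if PySem.Chars.isIn ['\\','n'] e then
      String.mk (['"','"','\n'] ++ PySem.Chars.join ['\n']
        ((PySem.List.enumerate (PySem.Chars.splitOn e ['\\','n']) 0).foldl (fun acc ip =>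
          if ip.1 < ((PySem.Chars.splitOn e ['\\','n']).length : Int) - 1 then
            acc ++ [['"'] ++ ip.2 ++ ['\\','n','"']]
          else if ip.2 ≠ [] then acc ++ [['"'] ++ ip.2 ++ ['"']] else acc) []))
    else String.mk (['"'] ++ e ++ ['"'])) =
    (if !(PySem.Chars.isIn ['\\','n'] e) then String.mk (['"'] ++ e ++ ['"'])
     else String.mk (if PySem.Chars.endswith e ['\\','n']
       then PySem.List.slice (['"','"','\n','"'] ++
              PySem.Chars.replace e ['\\','n'] ['\\','n','"','\n','"'] ++ ['"']) none (some (-3))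
       else ['"','"','\n','"'] ++ PySem.Chars.replace e ['\\','n'] ['\\','n','"','\n','"'] ++ ['"'])) := by
  cases hin : PySem.Chars.isIn ['\\','n'] e with
  | false => simp
  | true =>
    simp only [Bool.not_true, Bool.false_eq_true, if_false]
    have hinf : ['\\','n'] <:+: e := (PySem.Chars.isIn_iff_infix _ _).1 hin
    have hene : e ≠ [] := by
      intro h; subst h
      exact absurd (List.eq_nil_of_infix_nil hinf) (by simp)
    have hparts : PySem.Chars.splitOn e ['\\','n'] =
        PySem.Chars.splitOn.go ['\\','n'] (e.length + 1) e [] [] := rfl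
    have hlen2 : 2 ≤ (PySem.Chars.splitOn e ['\\','n']).length := by
      rw [hparts]
      simpa using two_le_splitGo_length ['\\','n'] (by simp) (e.length + 1) e [] []
        (Nat.lt_succ_self _) hinf
    obtain hnil | ⟨qs, a, hqa⟩ := List.eq_nil_or_concat (PySem.Chars.splitOn e ['\\','n'])
    · rw [hnil] at hlen2; simp at hlen2
    rw [List.concat_eq_append] at hqa
    have hqs : qs ≠ [] := by
      intro h; rw [h] at hqa; rw [hqa] at hlen2; simp at hlen2
    have hlast : (PySem.Chars.splitOn e ['\\','n']).getLastD [] = a := by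
      rw [hqa]; simp
    have hlastiff := split_last (e.length + 1) e [] [] (Nat.lt_succ_self _)
    rw [← hparts, hlast] at hlastiff
    have hrep : PySem.Chars.replace e ['\\','n'] ['\\','n','"','\n','"'] =
        List.intercalate ['\\','n','"','\n','"'] (PySem.Chars.splitOn e ['\\','n']) := by
      show PySem.Chars.replace.go ['\\','n'] ['\\','n','"','\n','"'] e.length e [] = _
      rw [hparts]
      exact repGo_eq_intercalate _ _ (by simp) e.length (e.length + 1) e (le_refl _)
        (Nat.le_succ _)
    have hfold := fold_lines (PySem.Chars.splitOn e ['\\','n']) qs a hqa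
    have hqb := quote_bridge (PySem.Chars.splitOn e ['\\','n']) (by rw [hqa]; simp)
    rw [hlast] at hqb
    have hdrop : (PySem.Chars.splitOn e ['\\','n']).dropLast = qs := by
      rw [hqa]; simp
    rw [hdrop] at hqb
    have hends : PySem.Chars.endswith e ['\\','n'] = true ↔ a = [] := by
      rw [PySem.Chars.endswith_iff]
      constructor
      · intro h; exact hlastiff.2 (Or.inl h)
      · intro h
        rcases hlastiff.1 h with h' | ⟨h', -⟩
        · exact h'
        · exact absurd h' hene
    rw [hfold]
    show String.mk (['"','"','\n'] ++ List.intercalate ['\n'] _) = _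
    rw [hrep]
    by_cases ha : a = []
    · rw [if_pos (hends.2 ha)]
      subst ha
      have hre : (['"','"','\n'] : List Char) ++
          List.intercalate ['\n'] (qs.map (fun p => ['"'] ++ p ++ ['\\','n','"']) ++
            [['"'] ++ [] ++ ['"']]) =
          (['"','"','\n'] ++ List.intercalate ['\n'] (qs.map (fun p => ['"'] ++ p ++ ['\\','n','"'])))
            ++ ['\n','"','"'] := by
        rw [intercalate_concat _ _ (by simpa using hqs)]
        simp
      rw [show (['"','"','\n','"'] : List Char) ++
            List.intercalate ['\\','n','"','\n','"'] (PySem.Chars.splitOn e ['\\','n']) ++ ['"'] =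
          ['"','"','\n'] ++ (['"'] ++
            List.intercalate ['\\','n','"','\n','"'] (PySem.Chars.splitOn e ['\\','n']) ++ ['"'])
          from by simp]
      rw [hqb, hre, slice_neg3]
      simp
    · rw [if_neg (fun h => ha (hends.1 h))]
      rw [show (['"','"','\n','"'] : List Char) ++
            List.intercalate ['\\','n','"','\n','"'] (PySem.Chars.splitOn e ['\\','n']) ++ ['"'] =
          ['"','"','\n'] ++ (['"'] ++
            List.intercalate ['\\','n','"','\n','"'] (PySem.Chars.splitOn e ['\\','n']) ++ ['"'])
          from by simp]
      rw [hqb]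
      simp [ha]

-- ===== VERDICT (by name: the statement is the Claim_ definition above) =====
theorem encode_po_string_py_spec : Claim_equal_encode_po_string_py := by
  intro value _
  unfold Spec_encode_po_string_py encode_po_string_py encode_po_string_py_alt
  simp only [PySem.Chars.slice_eq_listSlice]
  exact core_eq _
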